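-- pv_equiv track=rewrite | github.com/ingMychal/cocuma-job-searcher | search.py | filter_jobs_by_title_or_company
-- ===== SOURCE A (Python) =====
-- def _normalize(s: str) -> str:
--     if not s:
--         return ""
--     return " ".join(str(s).lower().split())
--
-- def _words(query: str) -> list[str]:
--     if not query or not query.strip():
--         return []
--     return [w for w in query.strip().split() if w]
--
-- def filter_jobs_by_title_or_company(jobs: list[dict], query: str) -> list[dict]:
--     """
--     Filter jobs so the search query matches only in job title or company name.
--     Does not search in description or any other field.
--
--     - Case-insensitive.
--     - Multi-word: each word must appear in either title or company (AND).
--     """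
--     words = _words(query)
--     if not words:
--         return list(jobs)
--
--     normalized_words = [_normalize(w) for w in words]
--     result = []
--
--     for job in jobs:
--         title = _normalize((job.get("title") or ""))
--         company = _normalize((job.get("company") or ""))
--
--         match = True
--         for nw in normalized_words:
--             if nw not in title and nw not in company:
--                 match = False
--                 break
--         if match:
--             result.append(job)
--
--     return result
-- ===== SOURCE B (Python) =====
-- def _norm(s):
--     return " ".join(s.lower().split()) if s else ""
--
-- def filter_jobs_by_title_or_company(jobs, query):
--     words = [_norm(w) for w in query.strip().split() if w]
--     if not words:
--         return list(jobs)
--     candidates = [(job, _norm(job.get("title") or ""), _norm(job.get("company") or ""))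
--                   for job in jobs]
--     for w in words:
--         candidates = [c for c in candidates if w in c[1] or w in c[2]]
--     return [c[0] for c in candidates]
-- ===== Notes on version B (the rewrite author's own statement) =====
-- stated objective: alternative
-- what changed: Replaces the per-job inner word loop with early break by one-pass precomputation of (job, normalized title, normalized company) triples and iterative narrowing of the candidate list per query word, extracting surviving jobs at the end.
import Mathlib
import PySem

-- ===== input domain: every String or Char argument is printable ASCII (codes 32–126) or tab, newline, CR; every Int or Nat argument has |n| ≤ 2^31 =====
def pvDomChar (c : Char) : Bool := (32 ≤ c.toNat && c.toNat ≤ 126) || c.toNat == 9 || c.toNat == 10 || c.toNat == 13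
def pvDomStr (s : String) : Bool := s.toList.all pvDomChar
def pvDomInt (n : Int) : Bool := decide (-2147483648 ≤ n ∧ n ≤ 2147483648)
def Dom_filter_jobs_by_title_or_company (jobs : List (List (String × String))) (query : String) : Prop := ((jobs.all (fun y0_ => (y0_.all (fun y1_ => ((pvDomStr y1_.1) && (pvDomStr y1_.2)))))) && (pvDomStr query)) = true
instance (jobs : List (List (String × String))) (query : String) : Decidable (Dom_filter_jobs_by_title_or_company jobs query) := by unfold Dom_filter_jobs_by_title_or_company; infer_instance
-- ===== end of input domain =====

-- B keeps A's normalization and empty-query behaviour but inverts the loop nesting: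
-- it precomputes normalized (job, title, company) triples once and narrows the
-- candidate list word by word ("alternative": different decomposition, same cost).

-- ===== PORT A =====
-- _normalize
def pvNormA (s : String) : String :=
  if s = "" then "" else PySem.Str.join " " (PySem.Str.split₀ (PySem.Str.lower s))

-- _words
def pvWordsA (query : String) : List String :=
  if query = "" ∨ PySem.Str.strip query = "" then []
  else (PySem.Str.split₀ (PySem.Str.strip query)).filter (fun w => w ≠ "")

-- inner 'for nw in normalized_words' loop with its break (returns the final 'match' flag)
def pvMatchA : List String → String → String → Bool
  | [], _, _ => true
  | nw :: rest, title, company =>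
      if !PySem.Str.isIn nw title && !PySem.Str.isIn nw company then false
      else pvMatchA rest title company

def filter_jobs_by_title_or_company (jobs : List (List (String × String))) (query : String) : List (List (String × String)) :=
  let words := pvWordsA query
  if words = [] then jobs
  else
    let normalized_words := words.map pvNormA
    let result := jobs.foldl (fun result job =>
      let title := pvNormA (((PySem.Dict.mk job).get? "title").getD "")
      let company := pvNormA (((PySem.Dict.mk job).get? "company").getD "")
      if pvMatchA normalized_words title company then result ++ [job] else result) []
    result

-- ===== PORT B =====
-- _norm
def pvNormB (s : String) : String :=
  if s = "" then "" else PySem.Str.join " " (PySem.Str.split₀ (PySem.Str.lower s))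

def filter_jobs_by_title_or_company_alt (jobs : List (List (String × String))) (query : String) : List (List (String × String)) :=
  let words := ((PySem.Str.split₀ (PySem.Str.strip query)).filter (fun w => w ≠ "")).map pvNormB
  if words = [] then jobs
  else
    let candidates := jobs.map (fun job =>
      (job, pvNormB (((PySem.Dict.mk job).get? "title").getD ""),
            pvNormB (((PySem.Dict.mk job).get? "company").getD "")))
    let final := words.foldl (fun cand w =>
      cand.filter (fun c => PySem.Str.isIn w c.2.1 || PySem.Str.isIn w c.2.2)) candidates
    final.map (fun c => c.1)

-- ===== PRECONDITION & SPEC =====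
def Spec_filter_jobs_by_title_or_company (jobs : List (List (String × String))) (query : String) (out : List (List (String × String))) : Prop := out = filter_jobs_by_title_or_company_alt jobs query
instance (jobs : List (List (String × String))) (query : String) (out : List (List (String × String))) : Decidable (Spec_filter_jobs_by_title_or_company jobs query out) := by unfold Spec_filter_jobs_by_title_or_company; infer_instance

-- ===== CLAIM (what is proved, stated in full; the proofs are below) =====
def Claim_equal_filter_jobs_by_title_or_company : Prop := ∀ (jobs : List (List (String × String))) (query : String), Dom_filter_jobs_by_title_or_company jobs query → Spec_filter_jobs_by_title_or_company jobs query (filter_jobs_by_title_or_company jobs query)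

-- ===== LEMMAS AND PROOFS =====

-- A's inner loop computes the 'every word occurs in title or company' test
lemma pvMatchA_eq_all (nws : List String) (t c : String) :
    pvMatchA nws t c = nws.all (fun nw => PySem.Str.isIn nw t || PySem.Str.isIn nw c) := by
  induction nws with
  | nil => rfl
  | cons nw rest ih =>
      simp only [pvMatchA, List.all_cons, ih]
      cases PySem.Str.isIn nw t <;> cases PySem.Str.isIn nw c <;> simp

-- iterated filtering over a word list is one filter with the conjunction of the tests
lemma foldl_filter_eq_filter_all {α β : Type} (q : β → α → Bool) (ws : List β) (l : List α) :
    ws.foldl (fun cand w => cand.filter (q w)) l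
      = l.filter (fun x => ws.all (fun w => q w x)) := by
  induction ws generalizing l with
  | nil => simp
  | cons w rest ih =>
      simp only [List.foldl_cons, ih, List.filter_filter, List.all_cons]
      exact List.filter_congr (by intro x _; rw [Bool.and_comm])

lemma split₀_empty : PySem.Str.split₀ "" = [] := by decide

-- the two ports compute the same word list
lemma wordsA_eq (query : String) :
    pvWordsA query = (PySem.Str.split₀ (PySem.Str.strip query)).filter (fun w => w ≠ "") := by
  unfold pvWordsA
  split_ifs with h
  · rcases h with h | h
    · subst h; decide
    · rw [h, split₀_empty]; rfl
  · rfl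

-- ===== VERDICT (by name: the statement is the Claim_ definition above) =====
theorem filter_jobs_by_title_or_company_spec : Claim_equal_filter_jobs_by_title_or_company := by
  intro jobs query _
  show filter_jobs_by_title_or_company jobs query = filter_jobs_by_title_or_company_alt jobs query
  unfold filter_jobs_by_title_or_company filter_jobs_by_title_or_company_alt
  rw [wordsA_eq]
  set rawWords := (PySem.Str.split₀ (PySem.Str.strip query)).filter (fun w => w ≠ "") with hraw
  by_cases h : rawWords = []
  · simp [h]
  · have h2 : rawWords.map pvNormB ≠ [] := by simpa using h
    simp only [h, h2, if_neg, not_false_iff]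
    rw [foldl_filter_eq_filter_all, List.filter_map, List.map_map,
        PySem.List.foldl_append_if_eq_filter]
    simp only [List.nil_append, Function.comp_def]
    have : (fun j : List (String × String) => j) = id := rfl
    rw [this, List.map_id]
    exact List.filter_congr (by
      intro job _
      rw [pvMatchA_eq_all]
      show (rawWords.map pvNormA).all _ = (rawWords.map pvNormB).all _
      rfl)
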